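-- pv_equiv track=rewrite | github.com/qq20739111/Python-CodeMinifier | minify_code.py | _line_col_to_pos
-- ===== SOURCE A (Python) =====
-- from typing import Set, Tuple, Optional, Dict, Any
--
-- def _line_col_to_pos(text: str, line_col: Tuple[int, int]) -> int:
--     """
--     将行列坐标转换为文本中的绝对位置（改进版本）
--
--     Args:
--         text: 文本内容
--         line_col: (line, col) 坐标 (1-based行, 0-based列)
--
--     Returns:
--         绝对位置
--     """
--     line, col = line_col
--     lines = text.split('\n')
--
--     # 更严格的边界检查
--     if line < 1 or line > len(lines):
--         return len(text)
--
--     # 考虑文件末尾是否有换行符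
--     pos = 0
--     for i in range(line - 1):
--         pos += len(lines[i])
--         if i < len(lines) - 1 or text.endswith('\n'):
--             pos += 1  # 换行符
--
--     # 确保col不会超出当前行的长度
--     current_line_length = len(lines[line - 1]) if line <= len(lines) else 0
--     safe_col = min(col, current_line_length)
--
--     return min(pos + safe_col, len(text))
-- ===== SOURCE B (Python) =====
-- def _line_col_to_pos(text, line_col):
--     line, col = line_col
--     n = text.count('\n') + 1          # number of lines
--     if line < 1 or line > n:
--         return len(text)
--     pos = 0                           # scan to the start of the target line
--     for _ in range(line - 1):
--         pos = text.find('\n', pos) + 1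
--     nl = text.find('\n', pos)         # end of the current line
--     cur_len = (nl if nl != -1 else len(text)) - pos
--     return pos + min(col, cur_len)
-- ===== Notes on version B (the rewrite author's own statement) =====
-- stated objective: alternative
-- what changed: Instead of materializing the list of lines with split('\n') and summing their lengths, B scans the original string in place: it validates the line number with count('\n')+1, advances a running position with repeated find('\n', pos) to the start of the target line, and reads the current line's length off the next newline position.
import Mathlib
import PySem

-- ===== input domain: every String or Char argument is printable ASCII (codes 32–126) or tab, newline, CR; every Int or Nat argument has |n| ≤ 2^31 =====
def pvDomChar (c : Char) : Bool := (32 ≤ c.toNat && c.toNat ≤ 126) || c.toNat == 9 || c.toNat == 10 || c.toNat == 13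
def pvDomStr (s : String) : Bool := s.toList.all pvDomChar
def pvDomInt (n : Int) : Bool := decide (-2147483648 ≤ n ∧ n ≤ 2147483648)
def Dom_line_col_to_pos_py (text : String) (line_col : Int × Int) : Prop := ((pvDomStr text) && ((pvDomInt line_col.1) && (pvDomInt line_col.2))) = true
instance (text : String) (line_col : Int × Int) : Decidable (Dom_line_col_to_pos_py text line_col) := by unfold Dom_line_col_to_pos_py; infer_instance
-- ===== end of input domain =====

-- B replaces A's split-into-a-lines-list-and-sum-lengths with an in-place scan of the text
-- (count/find of '\n' maintaining a running position); same return value on every input.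

-- ===== PORT A =====
-- text.split('\n'): the separator is the nonempty literal "\n", so split? always returns some.
-- lines[i] inside the loop is always in range (i < line-1 ≤ len(lines)-1), ported as pyGetD.
def line_col_to_pos_py (text : String) (line_col : Int × Int) : Int :=
  let line := line_col.1
  let col := line_col.2
  let lines : List String := (PySem.Str.split? text "\n").getD []
  if line < 1 ∨ line > PySem.List.len lines then PySem.Str.len text
  else
    let pos : Int := (PySem.List.pyRange 0 (line - 1) 1).foldl
      (fun pos i =>
        let pos := pos + PySem.Str.len (PySem.List.pyGetD lines i "")
        if i < PySem.List.len lines - 1 ∨ PySem.Str.endswith text "\n" = true then pos + 1 else pos) 0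
    let current_line_length : Int :=
      if line ≤ PySem.List.len lines then PySem.Str.len (PySem.List.pyGetD lines (line - 1) "") else 0
    let safe_col := min col current_line_length
    min (pos + safe_col) (PySem.Str.len text)

-- ===== PORT B =====
def line_col_to_pos_py_alt (text : String) (line_col : Int × Int) : Int :=
  let line := line_col.1
  let col := line_col.2
  let n : Int := (PySem.Str.count text "\n" : Int) + 1
  if line < 1 ∨ line > n then PySem.Str.len text
  else
    let pos : Int := (PySem.List.pyRange 0 (line - 1) 1).foldl
      (fun pos _ => PySem.Str.findFrom text "\n" pos + 1) 0
    let nl := PySem.Str.findFrom text "\n" pos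
    let cur_len := (if nl ≠ -1 then nl else PySem.Str.len text) - pos
    pos + min col cur_len



-- ===== PRECONDITION & SPEC =====
def Spec_line_col_to_pos_py (text : String) (line_col : Int × Int) (out : Int) : Prop := out = line_col_to_pos_py_alt text line_col
instance (text : String) (line_col : Int × Int) (out : Int) : Decidable (Spec_line_col_to_pos_py text line_col out) := by unfold Spec_line_col_to_pos_py; infer_instance

-- ===== CLAIM (what is proved, stated in full; the proofs are below) =====
def Claim_equal_line_col_to_pos_py : Prop := ∀ (text : String) (line_col : Int × Int), Dom_line_col_to_pos_py text line_col → Spec_line_col_to_pos_py text line_col (line_col_to_pos_py text line_col)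

-- ===== LEMMAS AND PROOFS =====

-- my split on a single newline
def spNL : List Char → List (List Char)
  | [] => [[]]
  | c :: r => if c = '\n' then [] :: spNL r else (c :: (spNL r).headI) :: (spNL r).tail

theorem spNL_ne_nil (l : List Char) : spNL l ≠ [] := by
  cases l with
  | nil => simp [spNL]
  | cons c r => simp only [spNL]; split <;> simp

theorem length_spNL (l : List Char) : (spNL l).length = l.count '\n' + 1 := by
  induction l with
  | nil => simp [spNL]
  | cons c r ih =>
    simp only [spNL]
    by_cases h : c = '\n'
    · simp [h, ih, List.count_cons]
    · have := spNL_ne_nil r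
      simp [h, List.count_cons]
      cases hs : spNL r with
      | nil => exact absurd hs this
      | cons a t => simp [hs] at ih ⊢; omega

theorem spNL_no (l : List Char) (h : '\n' ∉ l) : spNL l = [l] := by
  induction l with
  | nil => rfl
  | cons c r ih =>
    simp only [List.mem_cons, not_or] at h
    simp [spNL, Ne.symm h.1, ih h.2]

theorem spNL_append (p r : List Char) (h : '\n' ∉ p) : spNL (p ++ '\n' :: r) = p :: spNL r := by
  induction p with
  | nil => simp [spNL]
  | cons c q ih =>
    simp only [List.mem_cons, not_or] at h
    simp only [List.cons_append, spNL, if_neg (fun hc => h.1 (Eq.symm hc))]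
    rw [ih h.2]
    simp

theorem spNL_decomp (l : List Char) (h : '\n' ∈ l) :
    ∃ p r, l = p ++ '\n' :: r ∧ '\n' ∉ p := by
  induction l with
  | nil => simp at h
  | cons c t ih =>
    by_cases hc : c = '\n'
    · exact ⟨[], t, by simp [hc], by simp⟩
    · have ht : '\n' ∈ t := by
        rcases List.mem_cons.mp h with h1 | h1
        · exact absurd h1.symm hc
        · exact h1
      obtain ⟨p, r, hpr, hp⟩ := ih ht
      exact ⟨c :: p, r, by simp [hpr], by simp only [List.mem_cons, not_or]; exact ⟨fun he => hc (Eq.symm he), hp⟩⟩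

def offNL (ps : List (List Char)) (j : Nat) : Nat :=
  ((ps.take j).map (fun p => p.length + 1)).sum

theorem offNL_zero (ps : List (List Char)) : offNL ps 0 = 0 := rfl

theorem offNL_cons (q : List Char) (ps : List (List Char)) (j : Nat) :
    offNL (q :: ps) (j + 1) = q.length + 1 + offNL ps j := by
  simp [offNL]

theorem offNL_take_succ (ps : List (List Char)) (j : Nat) (h : j < ps.length) :
    offNL ps (j + 1) = offNL ps j + (ps.getD j []).length + 1 := by
  induction ps generalizing j with
  | nil => simp at h
  | cons q t ih =>
    cases j with
    | zero => simp [offNL]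
    | succ j =>
      rw [offNL_cons, offNL_cons, ih j (by simpa using h)]
      simp; omega

theorem offNL_mono (ps : List (List Char)) {j k : Nat} (h : j ≤ k) (hk : k ≤ ps.length) :
    offNL ps j ≤ offNL ps k := by
  induction k with
  | zero =>
    have : j = 0 := by omega
    simp [this]
  | succ k ih =>
    rcases Nat.lt_or_ge j (k+1) with h1 | h1
    · have := ih (by omega) (by omega)
      rw [offNL_take_succ ps k (by omega)]; omega
    · have hj : j = k + 1 := by omega
      rw [hj]

theorem sum_spNL (l : List Char) :
    ((spNL l).map List.length).sum + (spNL l).length = l.length + 1 := by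
  induction l with
  | nil => simp [spNL]
  | cons c r ih =>
    simp only [spNL]
    by_cases h : c = '\n'
    · simp only [if_pos h, List.map_cons, List.sum_cons, List.length_cons]
      simp at ih ⊢; omega
    · rw [if_neg h]
      cases hs : spNL r with
      | nil => exact absurd hs (spNL_ne_nil r)
      | cons a t => simp [hs] at ih ⊢; omega

theorem offNL_full (ps : List (List Char)) :
    offNL ps ps.length = (ps.map List.length).sum + ps.length := by
  induction ps with
  | nil => simp [offNL]
  | cons q t ih => simp only [List.length_cons, offNL_cons, ih]; simp; omega

theorem offNL_spNL_full (l : List Char) :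
    offNL (spNL l) (spNL l).length = l.length + 1 := by
  rw [offNL_full, sum_spNL]


theorem find_first (p r : List Char) (hp : '\n' ∉ p) :
    PySem.Chars.find (p ++ '\n' :: r) ['\n'] = (p.length : Int) := by
  have hmem : '\n' ∈ p ++ '\n' :: r := by simp
  have hinf : ['\n'] <:+: p ++ '\n' :: r := by
    obtain ⟨s, t, hst⟩ := List.append_of_mem hmem
    exact ⟨s, t, by simp [hst]⟩
  have h0 : 0 ≤ PySem.Chars.find (p ++ '\n' :: r) ['\n'] :=
    (PySem.Chars.find_nonneg_iff _ _).mpr hinf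
  obtain ⟨h1, h2⟩ := PySem.Chars.find_spec h0
  have hat : ['\n'] <+: (p ++ '\n' :: r).drop p.length := by
    rw [List.drop_left]
    exact ⟨r, rfl⟩
  have hle : (PySem.Chars.find (p ++ '\n' :: r) ['\n']).toNat ≤ p.length := by
    by_contra hgt
    exact h2 p.length (by omega) hat
  have hchar : (p ++ '\n' :: r)[(PySem.Chars.find (p ++ '\n' :: r) ['\n']).toNat]? = some '\n' := by
    obtain ⟨t, ht⟩ := h1
    have hh := List.head?_drop (l := p ++ '\n' :: r)
      (i := (PySem.Chars.find (p ++ '\n' :: r) ['\n']).toNat)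
    rw [← ht] at hh
    simpa using hh.symm
  have heq : (PySem.Chars.find (p ++ '\n' :: r) ['\n']).toNat = p.length := by
    rcases Nat.lt_or_ge (PySem.Chars.find (p ++ '\n' :: r) ['\n']).toNat p.length with hlt | hge
    · exfalso
      rw [List.getElem?_append_left hlt, List.getElem?_eq_getElem hlt] at hchar
      have hpe : p[(PySem.Chars.find (p ++ '\n' :: r) ['\n']).toNat] = '\n' := by
        simpa using hchar
      exact hp (hpe ▸ p.getElem_mem hlt)
    · omega
  omega

theorem find_drop_key : ∀ (j : Nat) (cs : List Char), j < (spNL cs).length →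
    PySem.Chars.find (cs.drop (offNL (spNL cs) j)) ['\n'] =
      (if j + 1 = (spNL cs).length then -1 else (((spNL cs).getD j []).length : Int)) := by
  intro j
  induction j with
  | zero =>
    intro cs hj
    rw [offNL_zero, List.drop_zero]
    by_cases hmem : '\n' ∈ cs
    · obtain ⟨p, r, rfl, hp⟩ := spNL_decomp cs hmem
      simp only [spNL_append p r hp]
      have h1 : 1 ≤ (spNL r).length := List.length_pos_iff.mpr (spNL_ne_nil r)
      have h2 : ¬ (0 + 1 = (p :: spNL r).length) := by simp only [List.length_cons]; omega
      rw [if_neg h2]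
      simpa using find_first p r hp
    · simp only [spNL_no cs hmem]
      rw [if_pos (by simp)]
      refine (PySem.Chars.find_eq_neg_one_iff cs _).mpr ?_
      intro hinf
      obtain ⟨s, t, hst⟩ := hinf
      exact hmem (by rw [← hst]; simp)
  | succ j ih =>
    intro cs hj
    have hmem : '\n' ∈ cs := by
      by_contra hmem
      rw [spNL_no cs hmem] at hj
      simp at hj
    obtain ⟨p, r, rfl, hp⟩ := spNL_decomp cs hmem
    rw [spNL_append p r hp] at hj
    simp only [spNL_append p r hp]
    rw [offNL_cons]
    have hdrop : (p ++ '\n' :: r).drop (p.length + 1 + offNL (spNL r) j)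
        = r.drop (offNL (spNL r) j) := by
      rw [Nat.add_assoc, List.drop_append, List.drop_eq_nil_of_le (by omega),
        Nat.add_sub_cancel_left, List.nil_append, Nat.add_comm 1 (offNL (spNL r) j),
        List.drop_succ_cons]
    rw [hdrop, List.getD_cons_succ]
    have hj' : j < (spNL r).length := by simpa using hj
    rw [ih r hj']
    simp

theorem countNL_go : ∀ (fuel : Nat) (l : List Char) (acc : Nat), l.length ≤ fuel →
    PySem.Chars.count.go ['\n'] fuel l acc = acc + l.count '\n' := by
  intro fuel
  induction fuel with
  | zero =>
    intro l acc h
    have : l = [] := List.eq_nil_of_length_eq_zero (by omega)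
    subst this
    simp [PySem.Chars.count.go]
  | succ fuel ih =>
    intro l acc h
    cases l with
    | nil => simp [PySem.Chars.count.go]
    | cons c t =>
      by_cases hc : c = '\n'
      · subst hc
        have hpre : List.isPrefixOf ['\n'] ('\n' :: t) = true := by simp [List.isPrefixOf]
        simp only [PySem.Chars.count.go, hpre, if_true, List.drop_succ_cons, List.drop_zero,
          List.length_cons] at *
        simp only [List.length_nil, List.drop_zero]
        rw [ih t (acc + 1) (by omega)]
        simp [List.count_cons]
        omega
      · have hpre : List.isPrefixOf ['\n'] (c :: t) = false := by
          simp [List.isPrefixOf]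
          exact fun he => hc he.symm
        simp only [PySem.Chars.count.go, hpre, Bool.false_eq_true, if_false] at *
        rw [ih t acc (by simpa using h)]
        simp [List.count_cons, hc]

theorem countNL (l : List Char) : PySem.Chars.count l ['\n'] = l.count '\n' := by
  unfold PySem.Chars.count
  rw [if_neg (by simp)]
  rw [countNL_go l.length l 0 le_rfl]
  omega

theorem spNL_go : ∀ (fuel : Nat) (l cur : List Char) (acc : List (List Char)), l.length ≤ fuel →
    PySem.Chars.splitOn.go ['\n'] fuel l cur acc =
      acc.reverse ++ (cur.reverse ++ (spNL l).headI) :: (spNL l).tail := by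
  intro fuel
  induction fuel with
  | zero =>
    intro l cur acc h
    have : l = [] := List.eq_nil_of_length_eq_zero (by omega)
    subst this
    simp [PySem.Chars.splitOn.go, spNL]
  | succ fuel ih =>
    intro l cur acc h
    cases l with
    | nil => simp [PySem.Chars.splitOn.go, spNL]
    | cons c t =>
      by_cases hc : c = '\n'
      · subst hc
        have hpre : List.isPrefixOf ['\n'] ('\n' :: t) = true := by simp [List.isPrefixOf]
        simp only [PySem.Chars.splitOn.go, hpre, if_true, List.length_cons,
          List.drop_succ_cons, List.drop_zero] at *
        simp only [List.length_nil, List.drop_zero]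
        rw [ih t [] (cur.reverse :: acc) (by omega)]
        cases hs : spNL t with
        | nil => exact absurd hs (spNL_ne_nil t)
        | cons a u => simp [spNL, hs]
      · have hpre : List.isPrefixOf ['\n'] (c :: t) = false := by
          simp [List.isPrefixOf]
          exact fun he => hc he.symm
        simp only [PySem.Chars.splitOn.go, hpre, Bool.false_eq_true, if_false] at *
        rw [ih t (c :: cur) acc (by simpa using h)]
        cases hs : spNL t with
        | nil => exact absurd hs (spNL_ne_nil t)
        | cons a u => simp [spNL, hs, hc]

theorem splitOn_eq_spNL (l : List Char) : PySem.Chars.splitOn l ['\n'] = spNL l := by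
  unfold PySem.Chars.splitOn
  rw [spNL_go (l.length + 1) l [] [] (by omega)]
  cases hs : spNL l with
  | nil => exact absurd hs (spNL_ne_nil l)
  | cons a u => simp
theorem offNL_le (cs : List Char) (k : Nat) (hk : k < (spNL cs).length) :
    offNL (spNL cs) k + ((spNL cs).getD k []).length + 1 ≤ cs.length + 1 := by
  rw [← offNL_take_succ _ k hk, ← offNL_spNL_full cs]
  exact offNL_mono _ (by omega) le_rfl

theorem A_loop (text : String) (lines : List String)
    (hmap : lines.map String.toList = spNL text.toList) :
    ∀ k : Nat, k < lines.length →
      (PySem.List.pyRange 0 (k : Int) 1).foldl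
        (fun pos i =>
          if i < PySem.List.len lines - 1 ∨ PySem.Str.endswith text "\n" = true
          then pos + PySem.Str.len (PySem.List.pyGetD lines i "") + 1
          else pos + PySem.Str.len (PySem.List.pyGetD lines i "")) 0
        = (offNL (spNL text.toList) k : Int) := by
  intro k
  induction k with
  | zero =>
    intro _
    simp only [Nat.cast_zero]
    rw [PySem.List.pyRange_one_eq_nil le_rfl]
    simp [offNL_zero]
  | succ k ih =>
    intro hk
    have hcast : ((k + 1 : Nat) : Int) = (k : Int) + 1 := by push_cast; ring
    rw [hcast, PySem.List.pyRange_one_succ_right (by positivity), List.foldl_append,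
      ih (by omega), List.foldl_cons, List.foldl_nil]
    have hklines : k < lines.length := by omega
    have hk2 : k < (spNL text.toList).length := by
      have : lines.length = (spNL text.toList).length := by rw [← hmap]; simp
      omega
    rw [if_pos (Or.inl (by simp only [PySem.List.len_eq]; push_cast; omega))]
    rw [PySem.List.pyGetD_eq_getElem lines "" (by positivity) (by exact_mod_cast hklines)]
    simp only [Int.toNat_natCast]
    have h1 : (spNL text.toList)[k]'hk2 = (lines[k]'hklines).toList := by
      simp only [← hmap, List.getElem_map]
    rw [PySem.Str.len_eq, ← h1, offNL_take_succ _ k hk2, List.getD_eq_getElem _ _ hk2]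
    push_cast
    ring

theorem B_loop (text : String) :
    ∀ k : Nat, k < (spNL text.toList).length →
      (PySem.List.pyRange 0 (k : Int) 1).foldl
        (fun pos _ => PySem.Str.findFrom text "\n" pos + 1) 0
        = (offNL (spNL text.toList) k : Int) := by
  intro k
  induction k with
  | zero =>
    intro _
    simp only [Nat.cast_zero]
    rw [PySem.List.pyRange_one_eq_nil le_rfl]
    simp [offNL_zero]
  | succ k ih =>
    intro hk
    have hk2 : k < (spNL text.toList).length := by omega
    have hcast : ((k + 1 : Nat) : Int) = (k : Int) + 1 := by push_cast; ring
    rw [hcast, PySem.List.pyRange_one_succ_right (by positivity), List.foldl_append,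
      ih (by omega), List.foldl_cons, List.foldl_nil]
    rw [PySem.Str.findFrom_eq]
    have hnl : ("\n" : String).toList = ['\n'] := rfl
    rw [hnl]
    have hle : offNL (spNL text.toList) k ≤ text.toList.length := by
      have := offNL_le text.toList k hk2
      omega
    rw [PySem.Chars.findFrom_natCast text.toList ['\n'] _ hle]
    rw [find_drop_key k text.toList hk2, if_neg (by omega)]
    rw [if_neg (by omega)]
    rw [offNL_take_succ _ k hk2]
    push_cast
    ring

theorem AB (text : String) (line_col : Int × Int) :
    line_col_to_pos_py text line_col = line_col_to_pos_py_alt text line_col := by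
  obtain ⟨line, col⟩ := line_col
  have hnl : ("\n" : String).toList = ['\n'] := rfl
  obtain ⟨lines, hsplit, hmap⟩ :
      ∃ lines, PySem.Str.split? text "\n" = some lines ∧
        lines.map String.toList = spNL text.toList := by
    have h := PySem.Str.split?_map text "\n"
    rw [hnl] at h
    have h2 : PySem.Chars.split? text.toList ['\n'] = some (spNL text.toList) := by
      simp [PySem.Chars.split?, splitOn_eq_spNL]
    rw [h2] at h
    cases hs : PySem.Str.split? text "\n" with
    | none => rw [hs] at h; simp at h
    | some lines =>
      rw [hs] at h
      simp only [Option.map_some, Option.some_inj] at h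
      exact ⟨lines, rfl, h⟩
  have hlines : lines.length = (spNL text.toList).length := by rw [← hmap]; simp
  have hcount : (PySem.Str.count text "\n" : Int) + 1 = ((spNL text.toList).length : Int) := by
    rw [PySem.Str.count_eq, hnl, countNL]
    have := length_spNL text.toList
    push_cast
    omega
  have hlenI : PySem.List.len lines = ((spNL text.toList).length : Int) := by
    rw [PySem.List.len_eq, hlines]
  simp only [line_col_to_pos_py, line_col_to_pos_py_alt, hsplit, Option.getD_some]
  by_cases hv : line < 1 ∨ ((spNL text.toList).length : Int) < line
  · rw [if_pos (show line < 1 ∨ line > PySem.List.len lines by rw [hlenI]; omega),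
      if_pos (show line < 1 ∨ line > (PySem.Str.count text "\n" : Int) + 1 by rw [hcount]; omega)]
  · push_neg at hv
    rw [if_neg (show ¬ (line < 1 ∨ line > PySem.List.len lines) by rw [hlenI]; omega),
      if_neg (show ¬ (line < 1 ∨ line > (PySem.Str.count text "\n" : Int) + 1) by rw [hcount]; omega)]
    have h0 : (0 : Int) ≤ line - 1 := by omega
    have hkcast : ((line - 1).toNat : Int) = line - 1 := Int.toNat_of_nonneg h0
    set k := (line - 1).toNat with hkdef
    have hkL : k < (spNL text.toList).length := by omega
    have hklines : k < lines.length := by omega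
    rw [← hkcast]
    rw [A_loop text lines hmap k hklines, B_loop text k hkL]
    rw [if_pos (show line ≤ PySem.List.len lines by rw [hlenI]; omega)]
    rw [PySem.List.pyGetD_eq_getElem lines "" (by positivity) (by exact_mod_cast hklines)]
    simp only [Int.toNat_natCast]
    have h1 : (spNL text.toList)[k]'hkL = (lines[k]'hklines).toList := by
      simp only [← hmap, List.getElem_map]
    rw [PySem.Str.len_eq (lines[k]'hklines), ← h1]
    set plen := ((spNL text.toList)[k]'hkL).length with hplen
    have hgetD : (spNL text.toList).getD k [] = (spNL text.toList)[k]'hkL :=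
      List.getD_eq_getElem _ _ hkL
    have hoff := offNL_le text.toList k hkL
    rw [hgetD] at hoff
    rw [PySem.Str.findFrom_eq, hnl,
      PySem.Chars.findFrom_natCast text.toList ['\n'] _ (by omega),
      find_drop_key k text.toList hkL, hgetD]
    rw [PySem.Str.len_eq text]
    by_cases hlast : k + 1 = (spNL text.toList).length
    · rw [if_pos hlast]
      rw [if_pos (show (-1 : Int) = -1 from rfl)]
      rw [if_neg (show ¬ ((-1 : Int) ≠ -1) by omega)]
      have hfull : offNL (spNL text.toList) k + plen + 1 = text.toList.length + 1 := by
        have h2 := offNL_spNL_full text.toList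
        rw [← hlast, offNL_take_succ _ k hkL, hgetD] at h2
        omega
      have hcl : (text.toList.length : Int) - ↑(offNL (spNL text.toList) k) = (plen : Int) := by
        push_cast
        omega
      rw [hcl]
      rcases le_total col (plen : Int) with hc | hc
      · rw [min_eq_left hc, min_eq_left (by push_cast at hoff ⊢; omega)]
      · rw [min_eq_right hc, min_eq_left (by push_cast at hoff ⊢; omega)]
    · rw [if_neg hlast]
      rw [if_neg (show ¬ ((((spNL text.toList)[k]'hkL).length : Int) = -1) by omega)]
      rw [if_pos (show ((offNL (spNL text.toList) k : Int) + (((spNL text.toList)[k]'hkL).length : Int) ≠ -1) by omega)]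
      have hcl : (offNL (spNL text.toList) k : Int) + (plen : Int) - ↑(offNL (spNL text.toList) k) = (plen : Int) := by omega
      rw [hcl]
      rcases le_total col (plen : Int) with hc | hc
      · rw [min_eq_left hc, min_eq_left (by push_cast at hoff ⊢; omega)]
      · rw [min_eq_right hc, min_eq_left (by push_cast at hoff ⊢; omega)]

-- ===== VERDICT (by name: the statement is the Claim_ definition above) =====
theorem line_col_to_pos_py_spec : Claim_equal_line_col_to_pos_py := by
  intro text line_col _
  unfold Spec_line_col_to_pos_py
  exact AB text line_col
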